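-- pv_equiv track=rewrite | github.com/LukasStonie/PeptideDeNovoSequencing | Pipeline/ScoreCalculationUnidentified.py | calculateChunkIndex
-- ===== SOURCE A (Python) =====
-- def calculateChunkIndex(len_df, num_cores):
--     """Calculate the start and end indices for each chunk.
--     Parameters:
--     :param len_df: Length of the DataFrame.
--     :param num_cores: Number of cores to use for parallel processing.
--     :return: List of tuples containing the start and end indices for each chunk.
--     """
--     # Calculate the chunk size
--     chunk_size = len_df // num_cores
--     # Initialize a list to store start and end indices for each chunk
--     chunk_indices = []
--     # Create chunks and calculate start and end indices
--     for i in range(num_cores):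
--         start_index = i * chunk_size
--         end_index = (i + 1) * chunk_size if i < num_cores - 1 else len_df
--         chunk_indices.append((start_index, end_index))
--
--     return chunk_indices
-- ===== SOURCE B (Python) =====
-- def calculateChunkIndex(len_df, num_cores):
--     # Different decomposition: traverse the cores in REVERSE, carrying the next
--     # chunk's start as the current chunk's end; the last-chunk special case
--     # disappears into the initial accumulator end = len_df.
--     chunk_size = len_df // num_cores
--     chunks = []
--     end = len_df
--     for i in reversed(range(num_cores)):
--         start = i * chunk_size
--         chunks.append((start, end))
--         end = start
--     chunks.reverse()
--     return chunks
-- ===== Notes on version B (the rewrite author's own statement) =====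
-- stated objective: alternative
-- what changed: Builds the output back-to-front: iterates the cores in reverse carrying the next chunk's start as the current chunk's end in an accumulator (then reverses), so A's per-iteration last-chunk conditional and the two multiplications per iteration reduce to one multiplication and a boundary reuse.
import Mathlib
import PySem

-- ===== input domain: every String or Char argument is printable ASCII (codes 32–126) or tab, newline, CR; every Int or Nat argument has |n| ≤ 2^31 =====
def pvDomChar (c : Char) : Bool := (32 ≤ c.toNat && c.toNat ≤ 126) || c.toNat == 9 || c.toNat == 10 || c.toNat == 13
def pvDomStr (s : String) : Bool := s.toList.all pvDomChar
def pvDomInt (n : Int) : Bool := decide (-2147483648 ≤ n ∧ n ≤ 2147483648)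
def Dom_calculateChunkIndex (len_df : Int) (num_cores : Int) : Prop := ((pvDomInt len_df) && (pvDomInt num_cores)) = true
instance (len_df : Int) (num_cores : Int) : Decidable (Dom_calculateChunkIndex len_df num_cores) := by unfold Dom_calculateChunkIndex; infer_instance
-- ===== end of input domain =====

-- B builds the chunk list back-to-front with an accumulator carrying the next chunk's start,
-- eliminating A's per-iteration last-chunk conditional (objective: alternative).

-- ===== PORT A =====
def calculateChunkIndex (len_df : Int) (num_cores : Int) : List (Int × Int) :=
  let chunk_size := PySem.Int.floordiv len_df num_cores
  (PySem.List.pyRange 0 num_cores 1).foldl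
    (fun chunk_indices i =>
      chunk_indices ++ [(i * chunk_size,
        if i < num_cores - 1 then (i + 1) * chunk_size else len_df)]) []

-- ===== PORT B =====
def calculateChunkIndex_alt (len_df : Int) (num_cores : Int) : List (Int × Int) :=
  let chunk_size := PySem.Int.floordiv len_df num_cores
  -- for i in reversed(range(num_cores)): chunks.append((i*chunk_size, end)); end = i*chunk_size
  let st := ((PySem.List.pyRange 0 num_cores 1).reverse).foldl
    (fun (s : List (Int × Int) × Int) i =>
      (s.1 ++ [(i * chunk_size, s.2)], i * chunk_size))
    ([], len_df)
  st.1.reverse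

-- ===== PRECONDITION & SPEC =====
-- Pre_ excludes exactly num_cores = 0, where A raises ZeroDivisionError on 'len_df // num_cores'.
def Pre_calculateChunkIndex (len_df : Int) (num_cores : Int) : Prop := num_cores ≠ 0
instance (len_df : Int) (num_cores : Int) : Decidable (Pre_calculateChunkIndex len_df num_cores) := by unfold Pre_calculateChunkIndex; infer_instance
def pvWitness_calculateChunkIndex : Int × Int := (10, 3)

def Spec_calculateChunkIndex (len_df : Int) (num_cores : Int) (out : List (Int × Int)) : Prop := out = calculateChunkIndex_alt len_df num_cores
instance (len_df : Int) (num_cores : Int) (out : List (Int × Int)) : Decidable (Spec_calculateChunkIndex len_df num_cores out) := by unfold Spec_calculateChunkIndex; infer_instance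

-- ===== CLAIM (what is proved, stated in full; the proofs are below) =====
def Claim_equal_calculateChunkIndex : Prop := ∀ (len_df : Int) (num_cores : Int), Dom_calculateChunkIndex len_df num_cores → Pre_calculateChunkIndex len_df num_cores → Spec_calculateChunkIndex len_df num_cores (calculateChunkIndex len_df num_cores)

-- ===== LEMMAS AND PROOFS =====

-- the descending pair list B accumulates: g j e = [((j-1)cs, e), ((j-2)cs, (j-1)cs), …, (0, cs)]
def descChunks (cs : Int) : Nat → Int → List (Int × Int)
  | 0, _ => []
  | j + 1, e => ((j : Int) * cs, e) :: descChunks cs j ((j : Int) * cs)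

theorem reverse_range_succ (j : Nat) :
    (List.range (j + 1)).reverse = j :: (List.range j).reverse := by
  rw [List.range_succ, List.reverse_append]; simp

-- B's fold over [j-1, …, 0] from (out, e) produces out ++ descChunks cs j e
theorem foldB_eq_descChunks (cs : Int) : ∀ (j : Nat) (out : List (Int × Int)) (e : Int),
    ((List.range j).reverse.map (fun k : Nat => (k : Int))).foldl
      (fun (s : List (Int × Int) × Int) i => (s.1 ++ [(i * cs, s.2)], i * cs)) (out, e)
    = (out ++ descChunks cs j e,
       if j = 0 then e else 0)
  | 0, out, e => by simp [descChunks]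
  | j + 1, out, e => by
    rw [reverse_range_succ]
    simp only [List.map_cons, List.foldl_cons]
    rw [foldB_eq_descChunks cs j (out ++ [((j : Int) * cs, e)]) ((j : Int) * cs)]
    cases j with
    | zero => simp [descChunks]
    | succ j' => simp [descChunks]

-- reversing the descending list gives the boundary map plus the final (j*cs, e) pair
theorem descChunks_reverse (cs : Int) : ∀ (j : Nat) (e : Int),
    (descChunks cs (j + 1) e).reverse
      = (List.range j).map (fun k : Nat => ((k : Int) * cs, ((k : Int) + 1) * cs))
        ++ [((j : Int) * cs, e)]
  | 0, e => by simp [descChunks]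
  | j + 1, e => by
    rw [descChunks, List.reverse_cons, descChunks_reverse cs j, List.range_succ,
      List.map_append]
    simp only [List.map_singleton, List.append_assoc]
    have : ((j : Int) + 1) * cs = ((j + 1 : Nat) : Int) * cs := by push_cast; ring
    rw [this]

theorem calculateChunkIndex_spec : Claim_equal_calculateChunkIndex := by
  unfold Claim_equal_calculateChunkIndex
  intro len_df n _ hpre
  unfold Pre_calculateChunkIndex at hpre
  simp only [Spec_calculateChunkIndex, calculateChunkIndex, calculateChunkIndex_alt]
  set cs := PySem.Int.floordiv len_df n with hcs
  rcases lt_or_gt_of_ne hpre with hn | hn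
  · -- n < 0 : empty range on both sides
    rw [PySem.List.pyRange_one_eq_nil (by omega)]
    simp
  · -- n > 0
    obtain ⟨m, hm⟩ : ∃ m : Nat, n = ((m + 1 : Nat) : Int) := ⟨(n - 1).toNat, by omega⟩
    subst hm
    rw [PySem.List.pyRange_one, PySem.List.foldl_append_singleton_eq_map]
    simp only [sub_zero, Int.toNat_natCast, List.map_map, List.nil_append, zero_add,
      ← List.map_reverse]
    rw [foldB_eq_descChunks cs (m + 1) [] len_df]
    simp only [List.nil_append]
    rw [descChunks_reverse cs m len_df, List.range_succ (n := m), List.map_append]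
    congr 1
    · apply List.map_congr_left
      intro k hk
      simp only [List.mem_range] at hk
      simp only [Function.comp]
      rw [if_pos (by push_cast; omega)]
    · simp only [List.map_singleton, Function.comp]
      rw [if_neg (by push_cast; omega)]
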